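-- pv_equiv track=rewrite | github.com/Lamanteee1700/test | pages/10_Japanese_market_news.py | parse_ai_summary
-- ===== SOURCE A (Python) =====
-- def parse_ai_summary(summary_text):
--     """Parse the AI summary into structured articles"""
--     articles = []
--
--     # Split by double newlines and process each section
--     sections = summary_text.split('\n\n')
--
--     current_article = {}
--     for section in sections:
--         section = section.strip()
--         if not section:
--             continue
--
--         # Check if this looks like a headline (starts with ** or is all caps/title case)
--         if section.startswith('**') and section.endswith('**'):
--             # Save previous article if exists
--             if current_article and 'headline' in current_article:
--                 articles.append(current_article)
--
--             # Start new article
--             current_article = {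
--                 'headline': section.replace('**', '').strip(),
--                 'summary': '',
--                 'link': ''
--             }
--         elif section.startswith('Link:') or section.startswith('link:'):
--             # Extract link
--             link = section.replace('Link:', '').replace('link:', '').strip()
--             if current_article:
--                 current_article['link'] = link
--         else:
--             # This is summary text
--             if current_article and not section.startswith('AI summary unavailable'):
--                 if current_article['summary']:
--                     current_article['summary'] += ' ' + section
--                 else:
--                     current_article['summary'] = section
--
--     # Add the last article
--     if current_article and 'headline' in current_article:
--         articles.append(current_article)
--
--     return articles
-- ===== SOURCE B (Python) =====
-- def parse_ai_summary(summary_text):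
--     """Parse the AI summary into structured articles (two-pass group-based rewrite)."""
--     sections = [t for t in (s.strip() for s in summary_text.split('\n\n')) if t]
--     # Pass 1: partition into (headline, body-sections) groups; drop pre-headline material.
--     groups = []
--     for s in sections:
--         if s.startswith('**') and s.endswith('**'):
--             groups.append((s, []))
--         elif groups:
--             groups[-1][1].append(s)
--     # Pass 2: render each group into an article dict.
--     result = []
--     for head, body in groups:
--         links = [t for t in body if t.startswith('Link:') or t.startswith('link:')]
--         link = links[-1].replace('Link:', '').replace('link:', '').strip() if links else ''
--         summary = ' '.join(t for t in body
--                            if not (t.startswith('Link:') or t.startswith('link:'))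
--                            and not t.startswith('AI summary unavailable'))
--         result.append({'headline': head.replace('**', '').strip(),
--                        'summary': summary, 'link': link})
--     return result
-- ===== Notes on version B (the rewrite author's own statement) =====
-- stated objective: alternative
-- what changed: A builds articles in one flat pass that mutates a current-article dict and flushes it on each headline; B first partitions the stripped non-empty sections into headline-led groups and then renders each group separately (summary = join of kept sections, link = last link section).
import Mathlib
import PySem

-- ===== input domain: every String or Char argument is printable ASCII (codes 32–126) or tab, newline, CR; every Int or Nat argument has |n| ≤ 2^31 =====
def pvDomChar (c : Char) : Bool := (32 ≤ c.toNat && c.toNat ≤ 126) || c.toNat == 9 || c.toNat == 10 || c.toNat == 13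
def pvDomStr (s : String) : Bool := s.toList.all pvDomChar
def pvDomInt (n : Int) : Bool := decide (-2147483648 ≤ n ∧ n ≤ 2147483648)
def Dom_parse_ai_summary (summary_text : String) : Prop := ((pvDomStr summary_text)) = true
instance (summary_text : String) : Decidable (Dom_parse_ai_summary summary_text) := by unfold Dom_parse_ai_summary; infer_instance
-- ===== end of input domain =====

-- B is a two-pass rewrite (partition sections into headline-led groups, then render each group);
-- objective: alternative decomposition, same values, no speed claim.

-- ===== PORT A =====
-- A: one flat pass over the sections, mutating a current-article dict and flushing it on each headline.
def pvAStep (st : List (PySem.Dict String String) × PySem.Dict String String) (sec0 : String) :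
    List (PySem.Dict String String) × PySem.Dict String String :=
  if PySem.Str.strip sec0 = "" then st
  else if PySem.Str.startswith (PySem.Str.strip sec0) "**"
      && PySem.Str.endswith (PySem.Str.strip sec0) "**" then
    ((if st.2.items ≠ [] ∧ st.2.contains "headline" = true then st.1 ++ [st.2] else st.1),
     PySem.Dict.ofList
       [("headline", PySem.Str.strip (PySem.Str.replace (PySem.Str.strip sec0) "**" "")),
        ("summary", ""), ("link", "")])
  else if PySem.Str.startswith (PySem.Str.strip sec0) "Link:"
      || PySem.Str.startswith (PySem.Str.strip sec0) "link:" then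
    if st.2.items ≠ [] then
      (st.1, st.2.insert "link" (PySem.Str.strip (PySem.Str.replace
        (PySem.Str.replace (PySem.Str.strip sec0) "Link:" "") "link:" "")))
    else st
  else
    if st.2.items ≠ [] ∧ (!PySem.Str.startswith (PySem.Str.strip sec0) "AI summary unavailable") = true then
      if st.2.getD "summary" "" ≠ "" then
        (st.1, st.2.insert "summary" (st.2.getD "summary" "" ++ " " ++ PySem.Str.strip sec0))
      else (st.1, st.2.insert "summary" (PySem.Str.strip sec0))
    else st

def parse_ai_summary (summary_text : String) : List (List (String × String)) :=
  -- sep "\n\n" ≠ "", so split? is always `some`; .getD [] only totalizes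
  let sections := (PySem.Str.split? summary_text "\n\n").getD []
  let fin := sections.foldl pvAStep ([], PySem.Dict.empty)
  let arts := if fin.2.items ≠ [] ∧ fin.2.contains "headline" = true then fin.1 ++ [fin.2] else fin.1
  arts.map PySem.Dict.items

-- ===== PORT B =====
-- B-side helpers (Source B's predicates and per-group renderer)
def pvIsHead (s : String) : Bool := PySem.Str.startswith s "**" && PySem.Str.endswith s "**"
def pvIsLink (s : String) : Bool := PySem.Str.startswith s "Link:" || PySem.Str.startswith s "link:"
def pvLinkVal (s : String) : String :=
  PySem.Str.strip (PySem.Str.replace (PySem.Str.replace s "Link:" "") "link:" "")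

-- pass 1 step: open a new group on a headline, else append to the last group (if any)
def pvBStep (gs : List (String × List String)) (s : String) : List (String × List String) :=
  if pvIsHead s then gs ++ [(s, [])]
  else
    match gs.getLast? with
    | none => gs
    | some g => gs.dropLast ++ [(g.1, g.2 ++ [s])]

-- pass 2: render one (headline, body) group into an article dict (as an assoc list)
def pvRender (g : String × List String) : List (String × String) :=
  let links := g.2.filter (fun t => pvIsLink t)
  let link := match links.getLast? with
    | some t => pvLinkVal t
    | none => ""
  let parts := g.2.filter (fun t => !pvIsLink t && !PySem.Str.startswith t "AI summary unavailable")
  [("headline", PySem.Str.strip (PySem.Str.replace g.1 "**" "")),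
   ("summary", PySem.Str.join " " parts),
   ("link", link)]

def parse_ai_summary_alt (summary_text : String) : List (List (String × String)) :=
  let sections := (((PySem.Str.split? summary_text "\n\n").getD []).map PySem.Str.strip).filter
    (fun t => t ≠ "")
  ((sections.foldl pvBStep []).map pvRender)

-- ===== PRECONDITION & SPEC =====
def Spec_parse_ai_summary (summary_text : String) (out : List (List (String × String))) : Prop := out = parse_ai_summary_alt summary_text
instance (summary_text : String) (out : List (List (String × String))) : Decidable (Spec_parse_ai_summary summary_text out) := by unfold Spec_parse_ai_summary; infer_instance

-- ===== CLAIM (what is proved, stated in full; the proofs are below) =====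
def Claim_equal_parse_ai_summary : Prop := ∀ (summary_text : String), Dom_parse_ai_summary summary_text → Spec_parse_ai_summary summary_text (parse_ai_summary summary_text)

-- ===== LEMMAS AND PROOFS =====

-- A's final flush, as a function of A's fold state
def pvFinish (st : List (PySem.Dict String String) × PySem.Dict String String) :
    List (List (String × String)) :=
  (if st.2.items ≠ [] ∧ st.2.contains "headline" = true then st.1 ++ [st.2] else st.1).map
    PySem.Dict.items

-- the dict A holds for an in-progress group g: exactly the rendered group
def grpD (g : String × List String) : PySem.Dict String String :=
  PySem.Dict.mk (pvRender g)

-- B's pass-1 step with strip-and-drop-empties fused in (what the filtered/mapped fold computes)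
def pvCStep (gs : List (String × List String)) (s : String) : List (String × List String) :=
  if PySem.Str.strip s = "" then gs else pvBStep gs (PySem.Str.strip s)

lemma toList_eq_nil_iff (s : String) : s.toList = [] ↔ s = "" := by
  constructor
  · intro h; exact String.toList_inj.mp (by simpa using h)
  · intro h; simp [h]

lemma join_append_singleton (sep : List Char) (l : List (List Char)) (t : List Char) :
    PySem.Chars.join sep (l ++ [t]) =
      if l = [] then t else PySem.Chars.join sep l ++ sep ++ t := by
  induction l with
  | nil => simp [PySem.Chars.join_singleton]
  | cons p l ih =>
    cases l with
    | nil => simp [PySem.Chars.join_cons_cons, PySem.Chars.join_singleton]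
    | cons q r =>
      have ih' : PySem.Chars.join sep ((q :: r) ++ [t])
          = PySem.Chars.join sep (q :: r) ++ sep ++ t := by
        rw [ih, if_neg (by simp)]
      simp only [List.cons_append] at ih' ⊢
      rw [PySem.Chars.join_cons_cons, ih', PySem.Chars.join_cons_cons, if_neg (by simp)]
      simp [List.append_assoc]

lemma str_join_append_singleton (parts : List String) (t : String) :
    PySem.Str.join " " (parts ++ [t]) =
      if parts = [] then t else PySem.Str.join " " parts ++ " " ++ t := by
  by_cases hp : parts = []
  · subst hp
    apply String.toList_inj.mp
    simp [PySem.Str.toList_join, PySem.Chars.join_singleton]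
  · rw [if_neg hp]
    apply String.toList_inj.mp
    simp only [PySem.Str.toList_join, List.map_append, List.map_cons, List.map_nil,
      join_append_singleton]
    rw [if_neg (fun h => hp (List.map_eq_nil_iff.mp h))]
    simp [PySem.Str.toList_join]

lemma str_join_ne_empty (parts : List String) (hne : parts ≠ [])
    (hall : ∀ x ∈ parts, x ≠ "") : PySem.Str.join " " parts ≠ "" := by
  obtain ⟨p, rest, rfl⟩ := List.exists_cons_of_ne_nil hne
  intro h
  have h' : (PySem.Str.join " " (p :: rest)).toList = [] := by simp [h]
  rw [PySem.Str.toList_join] at h'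
  have hp : p.toList = [] → False := fun hh =>
    hall p (by simp) ((toList_eq_nil_iff p).mp hh)
  cases rest with
  | nil =>
    rw [List.map_cons, List.map_nil, PySem.Chars.join_singleton] at h'
    exact hp h'
  | cons q r =>
    rw [List.map_cons, List.map_cons, PySem.Chars.join_cons_cons] at h'
    simp only [List.append_assoc, List.append_eq_nil_iff] at h'
    exact hp h'.1

-- the rendered dict, written out (rfl: pvRender's lets zeta-reduce)
lemma grpD_mk (h : String) (b : List String) :
    grpD (h, b) = PySem.Dict.mk
      [("headline", PySem.Str.strip (PySem.Str.replace h "**" "")),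
       ("summary", PySem.Str.join " "
          (b.filter (fun t => !pvIsLink t && !PySem.Str.startswith t "AI summary unavailable"))),
       ("link", match (b.filter (fun t => pvIsLink t)).getLast? with
                | some t => pvLinkVal t
                | none => "")] := rfl

lemma grpD_flush (g : String × List String) :
    (grpD g).items ≠ [] ∧ (grpD g).contains "headline" = true := by
  obtain ⟨h, b⟩ := g
  rw [grpD_mk]
  exact ⟨by simp, by simp⟩

lemma mk3_insert_link (a b c v : String) :
    (PySem.Dict.mk [("headline",a),("summary",b),("link",c)]).insert "link" v
      = PySem.Dict.mk [("headline",a),("summary",b),("link",v)] := rfl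

lemma mk3_insert_summary (a b c v : String) :
    (PySem.Dict.mk [("headline",a),("summary",b),("link",c)]).insert "summary" v
      = PySem.Dict.mk [("headline",a),("summary",v),("link",c)] := rfl

-- render a group after appending one more body section, per kind of section
lemma render_append_link (h : String) (b : List String) (t : String) (ht : pvIsLink t = true) :
    pvRender (h, b ++ [t]) =
      [("headline", PySem.Str.strip (PySem.Str.replace h "**" "")),
       ("summary", PySem.Str.join " "
          (b.filter (fun t => !pvIsLink t && !PySem.Str.startswith t "AI summary unavailable"))),
       ("link", pvLinkVal t)] := by
  simp [pvRender, List.filter_append, ht, -PySem.Str.startswith_eq, -PySem.Str.endswith_eq]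

lemma render_append_ai (h : String) (b : List String) (t : String) (ht : pvIsLink t = false)
    (hai : PySem.Str.startswith t "AI summary unavailable" = true) :
    pvRender (h, b ++ [t]) = pvRender (h, b) := by
  simp [pvRender, List.filter_append, ht, hai, -PySem.Str.startswith_eq, -PySem.Str.endswith_eq]

lemma render_append_plain (h : String) (b : List String) (t : String) (ht : pvIsLink t = false)
    (hai : PySem.Str.startswith t "AI summary unavailable" = false) :
    pvRender (h, b ++ [t]) =
      [("headline", PySem.Str.strip (PySem.Str.replace h "**" "")),
       ("summary", PySem.Str.join " "
          ((b.filter (fun t => !pvIsLink t && !PySem.Str.startswith t "AI summary unavailable")) ++ [t])),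
       ("link", match (b.filter (fun t => pvIsLink t)).getLast? with
                | some t => pvLinkVal t
                | none => "")] := by
  simp [pvRender, List.filter_append, ht, hai, -PySem.Str.startswith_eq, -PySem.Str.endswith_eq]

-- the main induction: once a group is open, A's state is (rendered done-groups, dict of the open group)
lemma pvMain (secs : List String) : ∀ (done : List (String × List String)) (h : String)
    (b : List String), (∀ x ∈ b, x ≠ "") →
    pvFinish (secs.foldl pvAStep (done.map grpD, grpD (h, b)))
      = (secs.foldl pvCStep (done ++ [(h, b)])).map pvRender := by
  induction secs with
  | nil =>
    intro done h b _
    simp only [List.foldl_nil, pvFinish]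
    rw [if_pos (grpD_flush (h, b))]
    simp [grpD]
  | cons s rest ih =>
    intro done h b hb
    simp only [List.foldl_cons]
    have hbgrow : ∀ x ∈ b ++ [PySem.Str.strip s], PySem.Str.strip s ≠ "" → x ≠ "" := by
      intro x hx hne
      rcases List.mem_append.mp hx with h1 | h1
      · exact hb x h1
      · simpa [List.mem_singleton.mp h1] using hne
    by_cases hemp : PySem.Str.strip s = ""
    · rw [show pvAStep (done.map grpD, grpD (h, b)) s = (done.map grpD, grpD (h, b)) by
          simp only [pvAStep]; rw [if_pos hemp]]
      rw [show pvCStep (done ++ [(h, b)]) s = done ++ [(h, b)] by simp [pvCStep, hemp]]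
      exact ih done h b hb
    · by_cases hhead : pvIsHead (PySem.Str.strip s) = true
      · rw [show pvAStep (done.map grpD, grpD (h, b)) s
              = ((done ++ [(h, b)]).map grpD, grpD (PySem.Str.strip s, [])) by
            simp only [pvAStep]
            rw [if_neg hemp, if_pos (by simpa [pvIsHead] using hhead),
                if_pos (grpD_flush (h, b))]
            rw [show PySem.Dict.ofList
                  [("headline", PySem.Str.strip (PySem.Str.replace (PySem.Str.strip s) "**" "")),
                   ("summary", ""), ("link", "")] = grpD (PySem.Str.strip s, []) from rfl]
            simp]
        rw [show pvCStep (done ++ [(h, b)]) s = (done ++ [(h, b)]) ++ [(PySem.Str.strip s, [])] by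
            simp [pvCStep, hemp, pvBStep, hhead]]
        exact ih (done ++ [(h, b)]) (PySem.Str.strip s) [] (by simp)
      · have hbstep : pvCStep (done ++ [(h, b)]) s = done ++ [(h, b ++ [PySem.Str.strip s])] := by
          simp [pvCStep, hemp, pvBStep, hhead]
        by_cases hlink : pvIsLink (PySem.Str.strip s) = true
        · rw [show pvAStep (done.map grpD, grpD (h, b)) s
                = (done.map grpD, grpD (h, b ++ [PySem.Str.strip s])) by
              simp only [pvAStep]
              rw [if_neg hemp, if_neg (by simpa [pvIsHead] using hhead),
                  if_pos (by simpa [pvIsLink] using hlink), if_pos (grpD_flush (h, b)).1]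
              rw [grpD_mk, mk3_insert_link,
                  show grpD (h, b ++ [PySem.Str.strip s])
                    = PySem.Dict.mk (pvRender (h, b ++ [PySem.Str.strip s])) from rfl,
                  render_append_link h b _ hlink]
              rfl]
          rw [hbstep]
          exact ih done h (b ++ [PySem.Str.strip s]) (fun x hx => hbgrow x hx hemp)
        · by_cases hai : PySem.Str.startswith (PySem.Str.strip s) "AI summary unavailable" = true
          · rw [show pvAStep (done.map grpD, grpD (h, b)) s = (done.map grpD, grpD (h, b)) by
                simp only [pvAStep]
                rw [if_neg hemp, if_neg (by simpa [pvIsHead] using hhead),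
                    if_neg (by simpa [pvIsLink] using hlink),
                    if_neg (fun hc => absurd hc.2 (by simpa using hai))]]
            rw [hbstep]
            rw [show grpD (h, b) = grpD (h, b ++ [PySem.Str.strip s]) by
                unfold grpD; rw [render_append_ai h b _ (by simpa using hlink) hai]]
            exact ih done h (b ++ [PySem.Str.strip s]) (fun x hx => hbgrow x hx hemp)
          · -- plain kept section: the summary grows
            have hparts : ∀ x ∈ b.filter
                (fun t => !pvIsLink t && !PySem.Str.startswith t "AI summary unavailable"),
                x ≠ "" := fun x hx => hb x (List.mem_of_mem_filter hx)
            rw [show pvAStep (done.map grpD, grpD (h, b)) s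
                  = (done.map grpD, grpD (h, b ++ [PySem.Str.strip s])) by
                simp only [pvAStep]
                rw [if_neg hemp, if_neg (by simpa [pvIsHead] using hhead),
                    if_neg (by simpa [pvIsLink] using hlink),
                    if_pos ⟨(grpD_flush (h, b)).1, by simpa using hai⟩]
                rw [show grpD (h, b ++ [PySem.Str.strip s]) = PySem.Dict.mk
                      (pvRender (h, b ++ [PySem.Str.strip s])) from rfl,
                   render_append_plain h b _ (by simpa using hlink) (by simpa using hai)]
                rw [grpD_mk,
                    show (PySem.Dict.mk
                    [("headline", PySem.Str.strip (PySem.Str.replace h "**" "")),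
                     ("summary", PySem.Str.join " " (b.filter
                        (fun t => !pvIsLink t && !PySem.Str.startswith t "AI summary unavailable"))),
                     ("link", match (b.filter (fun t => pvIsLink t)).getLast? with
                              | some t => pvLinkVal t
                              | none => "")]).getD "summary" ""
                    = PySem.Str.join " " (b.filter
                        (fun t => !pvIsLink t && !PySem.Str.startswith t "AI summary unavailable"))
                    from rfl]
                rw [str_join_append_singleton]
                by_cases hnil : b.filter
                    (fun t => !pvIsLink t && !PySem.Str.startswith t "AI summary unavailable") = []
                · rw [if_pos hnil, hnil, if_neg (by simp [PySem.Str.join]), mk3_insert_summary]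
                · rw [if_neg hnil, if_pos (str_join_ne_empty _ hnil hparts), mk3_insert_summary]]
            rw [hbstep]
            exact ih done h (b ++ [PySem.Str.strip s]) (fun x hx => hbgrow x hx hemp)

-- before the first headline, A's state stays ([], empty) and B's groups stay []
lemma pvMain0 (secs : List String) :
    pvFinish (secs.foldl pvAStep ([], PySem.Dict.empty))
      = (secs.foldl pvCStep []).map pvRender := by
  induction secs with
  | nil => rfl
  | cons s rest ih =>
    simp only [List.foldl_cons]
    by_cases hemp : PySem.Str.strip s = ""
    · rw [show pvAStep ([], PySem.Dict.empty) s = ([], PySem.Dict.empty) by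
          simp only [pvAStep]; rw [if_pos hemp]]
      rw [show pvCStep [] s = [] by simp [pvCStep, hemp]]
      exact ih
    · by_cases hhead : pvIsHead (PySem.Str.strip s) = true
      · rw [show pvAStep ([], PySem.Dict.empty) s
              = (([] : List (String × List String)).map grpD, grpD (PySem.Str.strip s, [])) by
            simp only [pvAStep]
            rw [if_neg hemp, if_pos (by simpa [pvIsHead] using hhead),
                if_neg (by simp [PySem.Dict.empty])]
            rfl]
        rw [show pvCStep [] s = [] ++ [(PySem.Str.strip s, [])] by
            simp [pvCStep, hemp, pvBStep, hhead]]
        exact pvMain rest [] (PySem.Str.strip s) [] (by simp)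
      · rw [show pvCStep [] s = [] by simp [pvCStep, hemp, pvBStep, hhead]]
        rw [show pvAStep ([], PySem.Dict.empty) s = ([], PySem.Dict.empty) by
            simp only [pvAStep]
            rw [if_neg hemp, if_neg (by simpa [pvIsHead] using hhead)]
            split_ifs with h1 h2 <;> simp [PySem.Dict.empty] at *]
        exact ih

-- ===== VERDICT (by name: the statement is the Claim_ definition above) =====
theorem parse_ai_summary_spec : Claim_equal_parse_ai_summary := by
  intro summary_text _
  unfold Spec_parse_ai_summary
  have e1 : parse_ai_summary summary_text
      = pvFinish (((PySem.Str.split? summary_text "\n\n").getD []).foldl pvAStep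
          ([], PySem.Dict.empty)) := rfl
  have e2 : parse_ai_summary_alt summary_text
      = ((((((PySem.Str.split? summary_text "\n\n").getD []).map PySem.Str.strip).filter
          (fun t => t ≠ "")).foldl pvBStep []).map pvRender) := rfl
  rw [e1, e2, List.foldl_filter, List.foldl_map]
  rw [show (fun (gs : List (String × List String)) (s : String) =>
      if (PySem.Str.strip s ≠ "" : Bool) = true then pvBStep gs (PySem.Str.strip s) else gs)
      = pvCStep by
    funext gs s
    simp only [pvCStep]
    by_cases h : PySem.Str.strip s = "" <;> simp [h]]
  exact pvMain0 ((PySem.Str.split? summary_text "\n\n").getD [])
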